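-- pv_equiv track=rewrite | github.com/Joost987/AIVDKerstpuzzel23 | Opgave26a.py | CheckIfLettersSame
-- ===== SOURCE A (Python) =====
-- def CheckIfLettersSame(woord,cryptedword):
--     length=len(woord)
--     for i in range(length):
--         for j in range(i+1,length):
--             if (cryptedword[i]==cryptedword[j] and cryptedword[i] in ["7","8"]) and (woord[i]!=woord[j]):
--                 return False
--             elif cryptedword[i]!=cryptedword[j] and woord[i]==woord[j]:
--                 return False
--     return True
-- ===== SOURCE B (Python) =====
-- def CheckIfLettersSame(woord, cryptedword):
--     letter_to_crypt = {}
--     crypt_to_letter = {}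
--     for w, c in zip(woord, cryptedword):
--         if c == "7" or c == "8":
--             prev = crypt_to_letter.get(c)
--             if prev is None:
--                 crypt_to_letter[c] = w
--             elif prev != w:
--                 return False
--         prev = letter_to_crypt.get(w)
--         if prev is None:
--             letter_to_crypt[w] = c
--         elif prev != c:
--             return False
--     return True
-- ===== Notes on version B (the rewrite author's own statement) =====
-- stated objective: faster
-- what changed: Replaced the nested all-position-pairs scan by a single pass over zip(woord, cryptedword) that keeps two dicts (the letter each '7'/'8' crypt char must map to, and the crypt char each letter must map to) and fails on the first mismatch.
import Mathlib
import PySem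

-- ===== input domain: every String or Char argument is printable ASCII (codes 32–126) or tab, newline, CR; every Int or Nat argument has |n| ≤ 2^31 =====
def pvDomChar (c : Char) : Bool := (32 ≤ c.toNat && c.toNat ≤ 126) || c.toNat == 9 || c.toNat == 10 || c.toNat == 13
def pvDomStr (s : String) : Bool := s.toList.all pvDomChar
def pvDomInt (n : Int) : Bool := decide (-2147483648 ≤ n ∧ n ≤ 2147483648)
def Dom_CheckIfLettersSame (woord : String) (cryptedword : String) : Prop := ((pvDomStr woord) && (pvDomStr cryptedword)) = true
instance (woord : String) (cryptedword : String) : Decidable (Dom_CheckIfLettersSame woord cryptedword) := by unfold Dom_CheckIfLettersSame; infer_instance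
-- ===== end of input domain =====

-- B replaces A's O(n^2) all-pairs scan by a single pass that records, in two dicts,
-- the letter required by each '7'/'8' crypt character and the crypt character required
-- by each letter (objective: faster, asymptotic).
-- Equivalence is about the return value; neither function mutates its arguments.


-- ===== PORT A =====
-- index helper: l[i] for an index A keeps in range on every access Pre_ admits
-- (the default ' ' is never reached under Pre_)
def pvWg (l : List Char) (i : Nat) : Char := l.getD i ' '

-- inner 'for j in range(i+1, length)' with early 'return False'
def pvAInner (wl cl : List Char) (i : Nat) : List Nat → Bool
  | [] => true
  | j :: js =>
    if ((pvWg cl i == pvWg cl j) && (pvWg cl i == '7' || pvWg cl i == '8')) && !(pvWg wl i == pvWg wl j) then false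
    else if (pvWg cl i != pvWg cl j) && (pvWg wl i == pvWg wl j) then false
    else pvAInner wl cl i js

-- outer 'for i in range(length)'
def pvAOuter (wl cl : List Char) (n : Nat) : List Nat → Bool
  | [] => true
  | i :: is => if pvAInner wl cl i ((List.range n).drop (i + 1)) then pvAOuter wl cl n is else false

def CheckIfLettersSame (woord : String) (cryptedword : String) : Bool :=
  let wl := woord.toList
  let cl := cryptedword.toList
  let length := wl.length
  pvAOuter wl cl length (List.range length)

-- ===== PORT B =====
-- one pass over zip(woord, cryptedword) with two dicts (see Source B):
-- crypt_to_letter: letter demanded by a '7'/'8' crypt char; letter_to_crypt: crypt char demanded by a letter;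
-- 'none' in the crypt phase = the early 'return False'
def pvBLoop : List (Char × Char) → PySem.Dict Char Char → PySem.Dict Char Char → Bool
  | [], _, _ => true
  | (w, c) :: rest, ltc, ctl =>
    match (if c == '7' || c == '8' then
             match ctl.get? c with
             | none => some (ctl.insert c w)
             | some prev => if prev != w then none else some ctl
           else some ctl) with
    | none => false
    | some ctl' =>
      match ltc.get? w with
      | none => pvBLoop rest (ltc.insert w c) ctl'
      | some prev => if prev != c then false else pvBLoop rest ltc ctl'

def CheckIfLettersSame_alt (woord : String) (cryptedword : String) : Bool :=
  pvBLoop (woord.toList.zip cryptedword.toList) PySem.Dict.empty PySem.Dict.empty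

-- ===== PRECONDITION & SPEC =====
-- the clash test A applies to a position pair (its 'return False' condition), as a Bool on the four characters
def pvClash (w0 c0 w1 c1 : Char) : Bool :=
  ((c0 == c1) && (c0 == '7' || c0 == '8') && !(w0 == w1)) || (!(c0 == c1) && (w0 == w1))

-- Pre_ excludes exactly the inputs on which A raises IndexError: cryptedword shorter than a
-- woord of at least 2 characters, unless a clashing pair (0, j) with j < len(cryptedword)
-- makes A return False before its first out-of-range access (third disjunct).
def Pre_CheckIfLettersSame (woord : String) (cryptedword : String) : Prop :=
  woord.toList.length ≤ cryptedword.toList.length ∨ woord.toList.length ≤ 1 ∨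
    (cryptedword.toList.length < woord.toList.length ∧
      ∃ j < cryptedword.toList.length, 0 < j ∧
        pvClash (woord.toList.getD 0 ' ') (cryptedword.toList.getD 0 ' ')
                (woord.toList.getD j ' ') (cryptedword.toList.getD j ' ') = true)
instance (woord : String) (cryptedword : String) : Decidable (Pre_CheckIfLettersSame woord cryptedword) := by
  unfold Pre_CheckIfLettersSame; infer_instance

def pvWitness_CheckIfLettersSame : String × String := ("aba", "787")

def Spec_CheckIfLettersSame (woord : String) (cryptedword : String) (out : Bool) : Prop := out = CheckIfLettersSame_alt woord cryptedword
instance (woord : String) (cryptedword : String) (out : Bool) : Decidable (Spec_CheckIfLettersSame woord cryptedword out) := by unfold Spec_CheckIfLettersSame; infer_instance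

-- ===== CLAIM (what is proved, stated in full; the proofs are below) =====
def Claim_equal_CheckIfLettersSame : Prop := ∀ (woord : String) (cryptedword : String), Dom_CheckIfLettersSame woord cryptedword → Pre_CheckIfLettersSame woord cryptedword → Spec_CheckIfLettersSame woord cryptedword (CheckIfLettersSame woord cryptedword)

-- ===== LEMMAS AND PROOFS =====

-- basic facts about the clash test
theorem pv_beq_comm (a b : Char) : (a == b) = (b == a) := by
  by_cases h : a = b
  · simp [h]
  · simp [h, Ne.symm h]

theorem pvClash_symm (w0 c0 w1 c1 : Char) : pvClash w0 c0 w1 c1 = pvClash w1 c1 w0 c0 := by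
  by_cases hc : c0 = c1
  · subst hc; simp only [pvClash]; rw [pv_beq_comm w0 w1]
  · have h1 : (c0 == c1) = false := by simp [hc]
    have h2 : (c1 == c0) = false := by simp [Ne.symm hc]
    simp only [pvClash, h1, h2]; rw [pv_beq_comm w0 w1]; simp

theorem pvClash_self (w c : Char) : pvClash w c w c = false := by simp [pvClash]

theorem pvClash_iff {w0 c0 w1 c1 : Char} :
    pvClash w0 c0 w1 c1 = true ↔
      ((c0 = c1 ∧ (c0 = '7' ∨ c0 = '8') ∧ w0 ≠ w1) ∨ (c0 ≠ c1 ∧ w0 = w1)) := by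
  simp [pvClash]; tauto

-- ---- A-side characterisation: A = true iff no pair (i, j), i < j < len(woord), clashes ----

theorem pv_mem_drop_range {n m j : Nat} : j ∈ (List.range n).drop m ↔ m ≤ j ∧ j < n := by
  rw [List.range_eq_range', List.drop_range']; simp only [List.mem_range']
  constructor
  · rintro ⟨i, hi, rfl⟩; omega
  · rintro ⟨h1, h2⟩; exact ⟨j - m, by omega, by omega⟩

theorem pvNotClash_eq (wi ci wj cj : Char) :
    (!pvClash wi ci wj cj) =
      (!(((ci == cj) && (ci == '7' || ci == '8')) && !(wi == wj)) && !((ci != cj) && (wi == wj))) := by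
  simp [pvClash, bne, Bool.and_assoc]

theorem pvAInner_eq (wl cl : List Char) (i : Nat) (js : List Nat) :
    pvAInner wl cl i js = js.all (fun j => !pvClash (pvWg wl i) (pvWg cl i) (pvWg wl j) (pvWg cl j)) := by
  induction js with
  | nil => rfl
  | cons j js ih =>
    rw [List.all_cons, ← ih, pvNotClash_eq]
    cases h1 : ((pvWg cl i == pvWg cl j) && (pvWg cl i == '7' || pvWg cl i == '8')) && !(pvWg wl i == pvWg wl j) <;>
    cases h2 : (pvWg cl i != pvWg cl j) && (pvWg wl i == pvWg wl j) <;>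
      simp [pvAInner, h1, h2]

theorem pvAOuter_eq (wl cl : List Char) (n : Nat) (is : List Nat) :
    pvAOuter wl cl n is = is.all (fun i => pvAInner wl cl i ((List.range n).drop (i + 1))) := by
  induction is with
  | nil => rfl
  | cons i is ih =>
    simp only [pvAOuter, List.all_cons, ← ih]
    cases pvAInner wl cl i ((List.range n).drop (i + 1)) <;> simp

theorem pvA_iff (woord cryptedword : String) :
    CheckIfLettersSame woord cryptedword = true ↔
      ∀ i j : Nat, i < j → j < woord.toList.length →
        pvClash (pvWg woord.toList i) (pvWg cryptedword.toList i)
                (pvWg woord.toList j) (pvWg cryptedword.toList j) = false := by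
  unfold CheckIfLettersSame
  rw [pvAOuter_eq]
  simp only [List.all_eq_true, List.mem_range, pvAInner_eq, pv_mem_drop_range,
    Bool.not_eq_eq_eq_not, Bool.not_true]
  constructor
  · intro h i j hij hj
    exact h i (by omega) j ⟨by omega, hj⟩
  · intro h i _ j ⟨h1, h2⟩
    exact h i j (by omega) h2

-- ---- B-side characterisation: B = true iff the zipped list is pairwise clash-free ----

def pvFindL (p : List (Char × Char)) (w : Char) : Option (Char × Char) := p.find? (fun q => q.1 == w)
def pvFindC (p : List (Char × Char)) (c : Char) : Option (Char × Char) := p.find? (fun q => q.2 == c)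

-- 'the pair x passes B's two dict checks against the processed prefix p'
def pvStepOK (p : List (Char × Char)) (x : Char × Char) : Prop :=
  (∀ q, pvFindL p x.1 = some q → q.2 = x.2) ∧
  ((x.2 = '7' ∨ x.2 = '8') → ∀ q, pvFindC p x.2 = some q → q.1 = x.1)

def pvSteps : List (Char × Char) → List (Char × Char) → Prop
  | _, [] => True
  | p, x :: xs => pvStepOK p x ∧ pvSteps (p ++ [x]) xs

def pvGood (l : List (Char × Char)) : Prop :=
  ∀ x ∈ l, ∀ y ∈ l, pvClash x.1 x.2 y.1 y.2 = false

theorem pvFindL_append (p : List (Char × Char)) (x : Char × Char) (w : Char) :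
    pvFindL (p ++ [x]) w = (pvFindL p w).or (if x.1 == w then some x else none) := by
  simp only [pvFindL, List.find?_append]
  cases p.find? (fun q => q.1 == w) <;> cases h : x.1 == w <;> simp [List.find?, h, Option.or]

theorem pvFindC_append (p : List (Char × Char)) (x : Char × Char) (c : Char) :
    pvFindC (p ++ [x]) c = (pvFindC p c).or (if x.2 == c then some x else none) := by
  simp only [pvFindC, List.find?_append]
  cases p.find? (fun q => q.2 == c) <;> cases h : x.2 == c <;> simp [List.find?, h, Option.or]

theorem pv_model_ltc_insert (p : List (Char × Char)) (w c : Char) (ltc : PySem.Dict Char Char)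
    (hl : ∀ w', ltc.get? w' = (pvFindL p w').map (·.2)) (hfl : pvFindL p w = none) :
    ∀ w', (ltc.insert w c).get? w' = (pvFindL (p ++ [(w, c)]) w').map (·.2) := by
  intro w'
  rw [PySem.Dict.get?_insert, pvFindL_append]
  by_cases h : w' = w
  · subst h; simp [hfl]
  · simp [h, Ne.symm h, hl w']

theorem pv_model_ltc_found (p : List (Char × Char)) (w c : Char) (ltc : PySem.Dict Char Char)
    (hl : ∀ w', ltc.get? w' = (pvFindL p w').map (·.2)) (q : Char × Char) (hfl : pvFindL p w = some q) :
    ∀ w', ltc.get? w' = (pvFindL (p ++ [(w, c)]) w').map (·.2) := by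
  intro w'
  rw [hl w', pvFindL_append]
  by_cases h : w' = w
  · subst h; rw [hfl]; rfl
  · have : ((w, c).1 == w') = false := by simp [Ne.symm h]
    simp [this]

theorem pv_model_ctl_insert (p : List (Char × Char)) (w c : Char) (ctl : PySem.Dict Char Char)
    (hc : ∀ c', (c' = '7' ∨ c' = '8') → ctl.get? c' = (pvFindC p c').map (·.1)) (hfc : pvFindC p c = none) :
    ∀ c', (c' = '7' ∨ c' = '8') → (ctl.insert c w).get? c' = (pvFindC (p ++ [(w, c)]) c').map (·.1) := by
  intro c' h78
  rw [PySem.Dict.get?_insert, pvFindC_append]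
  by_cases h : c' = c
  · subst h; simp [hfc]
  · simp [h, Ne.symm h, hc c' h78]

theorem pv_model_ctl_found (p : List (Char × Char)) (w c : Char) (ctl : PySem.Dict Char Char)
    (hc : ∀ c', (c' = '7' ∨ c' = '8') → ctl.get? c' = (pvFindC p c').map (·.1)) (q : Char × Char)
    (hfc : pvFindC p c = some q) :
    ∀ c', (c' = '7' ∨ c' = '8') → ctl.get? c' = (pvFindC (p ++ [(w, c)]) c').map (·.1) := by
  intro c' h78
  rw [hc c' h78, pvFindC_append]
  by_cases h : c' = c
  · subst h; rw [hfc]; rfl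
  · have : ((w, c).2 == c') = false := by simp [Ne.symm h]
    simp [this]

theorem pv_model_ctl_skip (p : List (Char × Char)) (w c : Char) (ctl : PySem.Dict Char Char)
    (hc : ∀ c', (c' = '7' ∨ c' = '8') → ctl.get? c' = (pvFindC p c').map (·.1))
    (h78 : (c == '7' || c == '8') = false) :
    ∀ c', (c' = '7' ∨ c' = '8') → ctl.get? c' = (pvFindC (p ++ [(w, c)]) c').map (·.1) := by
  intro c' h78'
  rw [hc c' h78', pvFindC_append]
  have hne : ((w, c).2 == c') = false := by
    simp only [Bool.or_eq_false_iff] at h78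
    rcases h78' with h | h <;> subst h <;> simp_all
  simp [hne]

theorem pvBLoop_iff (l : List (Char × Char)) :
    ∀ (p : List (Char × Char)) (ltc ctl : PySem.Dict Char Char),
    (∀ w, ltc.get? w = (pvFindL p w).map (·.2)) →
    (∀ c, (c = '7' ∨ c = '8') → ctl.get? c = (pvFindC p c).map (·.1)) →
    (pvBLoop l ltc ctl = true ↔ pvSteps p l) := by
  induction l with
  | nil => intro p ltc ctl _ _; simp [pvBLoop, pvSteps]
  | cons x rest ih =>
    intro p ltc ctl hl hc
    obtain ⟨w, c⟩ := x
    -- the letter_to_crypt phase, shared by all crypt-phase outcomes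
    have phase2 : ∀ ctl' : PySem.Dict Char Char,
        (∀ c', (c' = '7' ∨ c' = '8') → ctl'.get? c' = (pvFindC (p ++ [(w, c)]) c').map (·.1)) →
        ((match ltc.get? w with
          | none => pvBLoop rest (ltc.insert w c) ctl'
          | some prev => if prev != c then false else pvBLoop rest ltc ctl') = true ↔
          ((∀ q, pvFindL p w = some q → q.2 = c) ∧ pvSteps (p ++ [(w, c)]) rest)) := by
      intro ctl' hc'
      cases hfl : pvFindL p w with
      | none =>
        rw [hl w, hfl]
        simp only [Option.map_none]
        rw [ih (p ++ [(w, c)]) _ _ (pv_model_ltc_insert p w c ltc hl hfl) hc']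
        simp
      | some q =>
        rw [hl w, hfl]
        simp only [Option.map_some]
        by_cases hq : q.2 = c
        · have : (q.2 != c) = false := by simp [hq]
          rw [this]
          simp only [Bool.false_eq_true, if_false]
          rw [ih (p ++ [(w, c)]) _ _ (pv_model_ltc_found p w c ltc hl q hfl) hc']
          constructor
          · intro h; exact ⟨fun q' hq' => by cases hq'; exact hq, h⟩
          · intro h; exact h.2
        · have : (q.2 != c) = true := by simp [hq]
          rw [this]
          simp only [if_true]
          constructor
          · intro h; exact absurd h (by simp)
          · intro h; exact absurd (h.1 q rfl) hq
    cases h78 : (c == '7' || c == '8') with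
    | false =>
      have h78p : ¬ (c = '7' ∨ c = '8') := by
        simp only [Bool.or_eq_false_iff] at h78; rcases h78 with ⟨ha, hb⟩
        rintro (h | h) <;> subst h <;> simp_all
      show (match (if c == '7' || c == '8' then _ else some ctl) with
            | none => false
            | some ctl' => _) = true ↔ pvSteps p ((w, c) :: rest)
      rw [h78]
      simp only [Bool.false_eq_true, if_false]
      rw [phase2 ctl (pv_model_ctl_skip p w c ctl hc h78)]
      simp only [pvSteps, pvStepOK]
      constructor
      · rintro ⟨h1, h2⟩; exact ⟨⟨h1, fun h => absurd h h78p⟩, h2⟩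
      · rintro ⟨⟨h1, _⟩, h2⟩; exact ⟨h1, h2⟩
    | true =>
      have h78p : c = '7' ∨ c = '8' := by
        rcases Bool.or_eq_true_iff.mp h78 with h | h
        · exact Or.inl (by exact eq_of_beq h)
        · exact Or.inr (by exact eq_of_beq h)
      show (match (if c == '7' || c == '8' then
                     match ctl.get? c with
                     | none => some (ctl.insert c w)
                     | some prev => if prev != w then none else some ctl
                   else some ctl) with
            | none => false
            | some ctl' => _) = true ↔ pvSteps p ((w, c) :: rest)
      rw [h78]
      simp only [if_true]
      cases hfc : pvFindC p c with
      | none =>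
        rw [hc c h78p, hfc]
        simp only [Option.map_none]
        rw [phase2 (ctl.insert c w) (pv_model_ctl_insert p w c ctl hc hfc)]
        simp only [pvSteps, pvStepOK]
        constructor
        · rintro ⟨h1, h2⟩; exact ⟨⟨h1, fun _ q hq => by rw [hfc] at hq; cases hq⟩, h2⟩
        · rintro ⟨⟨h1, _⟩, h2⟩; exact ⟨h1, h2⟩
      | some q =>
        rw [hc c h78p, hfc]
        simp only [Option.map_some]
        by_cases hq : q.1 = w
        · have : (q.1 != w) = false := by simp [hq]
          rw [this]
          simp only [Bool.false_eq_true, if_false]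
          rw [phase2 ctl (pv_model_ctl_found p w c ctl hc q hfc)]
          simp only [pvSteps, pvStepOK]
          constructor
          · rintro ⟨h1, h2⟩; exact ⟨⟨h1, fun _ q' hq' => by rw [hfc] at hq'; cases hq'; exact hq⟩, h2⟩
          · rintro ⟨⟨h1, _⟩, h2⟩; exact ⟨h1, h2⟩
        · have : (q.1 != w) = true := by simp [hq]
          rw [this]
          simp only [if_true]
          constructor
          · intro h; exact absurd h (by simp)
          · rintro ⟨⟨_, h2⟩, _⟩; exact absurd (h2 h78p q hfc) hq

theorem pvSteps_first_agree (l : List (Char × Char)) :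
    ∀ p, pvSteps p l → ∀ x ∈ l,
      (∀ q, pvFindL (p ++ l) x.1 = some q → q.2 = x.2) ∧
      ((x.2 = '7' ∨ x.2 = '8') → ∀ q, pvFindC (p ++ l) x.2 = some q → q.1 = x.1) := by
  induction l with
  | nil => intro p _ x hx; cases hx
  | cons y ys ih =>
    intro p hs x hx
    obtain ⟨hok, hs'⟩ := hs
    rcases List.mem_cons.mp hx with rfl | hx
    · constructor
      · intro q hq
        rw [pvFindL, List.find?_append] at hq
        cases hfp : pvFindL p x.1 with
        | some q' =>
          rw [pvFindL] at hfp; rw [hfp] at hq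
          simp only [Option.some_or] at hq
          cases hq; exact hok.1 q hfp
        | none =>
          rw [pvFindL] at hfp; rw [hfp] at hq
          simp only [Option.or] at hq
          rw [List.find?] at hq
          simp only [beq_self_eq_true] at hq
          cases hq; rfl
      · intro h78 q hq
        rw [pvFindC, List.find?_append] at hq
        cases hfp : pvFindC p x.2 with
        | some q' =>
          rw [pvFindC] at hfp; rw [hfp] at hq
          simp only [Option.some_or] at hq
          cases hq; exact hok.2 h78 q hfp
        | none =>
          rw [pvFindC] at hfp; rw [hfp] at hq
          simp only [Option.or] at hq
          rw [List.find?] at hq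
          simp only [beq_self_eq_true] at hq
          cases hq; rfl
    · have := ih (p ++ [y]) hs' x hx
      rwa [List.append_assoc, List.singleton_append] at this

theorem pvGood_shift (p : List (Char × Char)) (x : Char × Char) (xs : List (Char × Char))
    (hg : pvGood (p ++ x :: xs)) : pvGood ((p ++ [x]) ++ xs) := by
  rw [List.append_assoc, List.singleton_append]; exact hg

theorem pvGood_steps (l : List (Char × Char)) :
    ∀ p, pvGood (p ++ l) → pvSteps p l := by
  induction l with
  | nil => intro p _; trivial
  | cons x xs ih =>
    intro p hg
    refine ⟨⟨?_, ?_⟩, ih (p ++ [x]) (pvGood_shift p x xs hg)⟩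
    · intro q hq
      have hqm : q ∈ p := List.mem_of_find?_eq_some hq
      have hpred : q.1 = x.1 := by have := List.find?_some hq; simpa using this
      have := hg q (List.mem_append_left _ hqm) x (List.mem_append_right _ (List.mem_cons_self))
      by_contra hne
      rw [← Bool.not_eq_true, pvClash_iff] at this
      exact this (Or.inr ⟨fun h => hne h, hpred⟩)
    · intro h78 q hq
      have hqm : q ∈ p := List.mem_of_find?_eq_some hq
      have hpred : q.2 = x.2 := by have := List.find?_some hq; simpa using this
      have := hg q (List.mem_append_left _ hqm) x (List.mem_append_right _ (List.mem_cons_self))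
      by_contra hne
      rw [← Bool.not_eq_true, pvClash_iff] at this
      exact this (Or.inl ⟨hpred, hpred ▸ h78, fun h => hne h⟩)

theorem pvSteps_iff_good (l : List (Char × Char)) : pvSteps [] l ↔ pvGood l := by
  constructor
  · intro h x hx y hy
    have Hx := pvSteps_first_agree l [] h x hx
    have Hy := pvSteps_first_agree l [] h y hy
    rw [List.nil_append] at Hx Hy
    by_contra hne
    rw [Bool.not_eq_false, pvClash_iff] at hne
    rcases hne with ⟨hc, h78, hww⟩ | ⟨hc, hww⟩
    · obtain ⟨q, hq⟩ : ∃ q, pvFindC l x.2 = some q := by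
        have : (pvFindC l x.2).isSome := List.find?_isSome.mpr ⟨x, hx, by simp⟩
        exact Option.isSome_iff_exists.mp this
      have h1 := Hx.2 h78 q hq
      have h2 := Hy.2 (hc ▸ h78) q (by rwa [← hc])
      exact hww (h1 ▸ h2 ▸ rfl)
    · obtain ⟨q, hq⟩ : ∃ q, pvFindL l x.1 = some q := by
        have : (pvFindL l x.1).isSome := List.find?_isSome.mpr ⟨x, hx, by simp⟩
        exact Option.isSome_iff_exists.mp this
      have h1 := Hx.1 q hq
      have h2 := Hy.1 q (by rwa [← hww])
      exact hc (h1 ▸ h2 ▸ rfl)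
  · intro h; exact pvGood_steps l [] (by simpa using h)

theorem pvB_iff (woord cryptedword : String) :
    CheckIfLettersSame_alt woord cryptedword = true ↔ pvGood (woord.toList.zip cryptedword.toList) := by
  rw [CheckIfLettersSame_alt,
    pvBLoop_iff _ [] _ _ (fun w => by simp [pvFindL, PySem.Dict.get?_empty])
      (fun c _ => by simp [pvFindC, PySem.Dict.get?_empty]),
    pvSteps_iff_good]

-- ---- the bridge: under Pre_ the two characterisations coincide ----

theorem pv_main (wl cl : List Char)
    (hpre : wl.length ≤ cl.length ∨ wl.length ≤ 1 ∨
      (cl.length < wl.length ∧ ∃ j < cl.length, 0 < j ∧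
        pvClash (wl.getD 0 ' ') (cl.getD 0 ' ') (wl.getD j ' ') (cl.getD j ' ') = true)) :
    ((∀ i j : Nat, i < j → j < wl.length →
        pvClash (pvWg wl i) (pvWg cl i) (pvWg wl j) (pvWg cl j) = false) ↔
      pvGood (wl.zip cl)) := by
  have hz : (wl.zip cl).length = min wl.length cl.length := List.length_zip
  have hpair : ∀ k (hk : k < (wl.zip cl).length),
      (wl.zip cl)[k] = (pvWg wl k, pvWg cl k) := by
    intro k hk
    rw [List.getElem_zip]
    unfold pvWg
    rw [List.getD_eq_getElem _ _ (by omega), List.getD_eq_getElem _ _ (by omega)]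
  rcases hpre with hnm | h1 | ⟨hlt, j, hjm, hj0, hcl⟩
  · have hzn : (wl.zip cl).length = wl.length := by omega
    constructor
    · intro hA x hx y hy
      obtain ⟨i, hi, rfl⟩ := List.mem_iff_getElem.mp hx
      obtain ⟨j, hj, rfl⟩ := List.mem_iff_getElem.mp hy
      rcases lt_trichotomy i j with h | h | h
      · rw [hpair i hi, hpair j hj]
        exact hA i j h (by omega)
      · subst h
        rw [hpair i hi]
        exact pvClash_self _ _
      · rw [hpair i hi, hpair j hj, pvClash_symm]
        exact hA j i h (by omega)
    · intro hB i j hij hjn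
      have hi' : i < (wl.zip cl).length := by omega
      have hj' : j < (wl.zip cl).length := by omega
      have := hB (wl.zip cl)[i] (List.getElem_mem hi') (wl.zip cl)[j] (List.getElem_mem hj')
      rwa [hpair i hi', hpair j hj'] at this
  · constructor
    · intro _ x hx y hy
      obtain ⟨i, hi, rfl⟩ := List.mem_iff_getElem.mp hx
      obtain ⟨j, hj, rfl⟩ := List.mem_iff_getElem.mp hy
      have : i = j := by omega
      subst this
      exact pvClash_self _ _
    · intro _ i j hij hjn
      exact absurd hjn (by omega)
  · have hjn : j < wl.length := by omega
    have hclw : pvClash (pvWg wl 0) (pvWg cl 0) (pvWg wl j) (pvWg cl j) = true := hcl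
    constructor
    · intro hA
      exact absurd (hA 0 j hj0 hjn) (by simp [hclw])
    · intro hB
      have h0z : 0 < (wl.zip cl).length := by omega
      have hjz : j < (wl.zip cl).length := by omega
      have := hB (wl.zip cl)[0] (List.getElem_mem h0z) (wl.zip cl)[j] (List.getElem_mem hjz)
      rw [hpair 0 h0z, hpair j hjz] at this
      exact absurd this (by simp [hclw])

-- ===== VERDICT (by name: the statement is the Claim_ definition above) =====
theorem CheckIfLettersSame_spec : Claim_equal_CheckIfLettersSame := by
  intro woord cryptedword _ hpre
  unfold Spec_CheckIfLettersSame
  rw [Bool.eq_iff_iff, pvA_iff, pvB_iff]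
  exact pv_main woord.toList cryptedword.toList hpre
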